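-- pv_equiv track=rewrite | github.com/BennatFr/FISA_A4-Systemes_automatises | tools.py | adjust_corners_for_interior
-- ===== SOURCE A (Python) =====
-- def adjust_corners_for_interior(corners, offset=5):
--     """
--     Ajuste les coins pour déplacer la buse à l'intérieur de l'objet.
--     :param corners: Liste des coordonnées des coins en mm [(x1, y1), (x2, y2), ...].
--     :param offset: Distance en mm pour déplacer les coins vers l'intérieur.
--     :return: Liste des coins ajustés.
--     """
--     # Coins ajustés
--     adjusted_corners = []
--
--     for idx, (x, y) in enumerate(corners):
--         if idx == 0:  # Top left
--             adjusted_corners.append((x + offset, y + offset))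
--         elif idx == 1:  # Top right
--             adjusted_corners.append((x - offset, y + offset))
--         elif idx == 2:  # Bottom right
--             adjusted_corners.append((x - offset, y - offset))
--         elif idx == 3:  # Bottom left
--             adjusted_corners.append((x + offset, y - offset))
--
--     return adjusted_corners
-- ===== SOURCE B (Python) =====
-- def adjust_corners_for_interior(corners, offset=5):
--     def go(pts, dx, dy):
--         if not pts:
--             return []
--         (x, y) = pts[0]
--         return [(x + dx, y + dy)] + go(pts[1:], -dy, dx)
--     return go(corners[:4], offset, offset)
-- ===== Notes on version B (the rewrite author's own statement) =====
-- stated objective: alternative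
-- what changed: Replaces A's enumerate loop with a four-way if/elif index branch by a recursion over corners[:4] that carries a delta vector seeded at (offset, offset) and rotated 90 degrees ((dx,dy) -> (-dy,dx)) at each step, so the per-corner shifts are generated by a rotation recurrence instead of selected by index.
import Mathlib
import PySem

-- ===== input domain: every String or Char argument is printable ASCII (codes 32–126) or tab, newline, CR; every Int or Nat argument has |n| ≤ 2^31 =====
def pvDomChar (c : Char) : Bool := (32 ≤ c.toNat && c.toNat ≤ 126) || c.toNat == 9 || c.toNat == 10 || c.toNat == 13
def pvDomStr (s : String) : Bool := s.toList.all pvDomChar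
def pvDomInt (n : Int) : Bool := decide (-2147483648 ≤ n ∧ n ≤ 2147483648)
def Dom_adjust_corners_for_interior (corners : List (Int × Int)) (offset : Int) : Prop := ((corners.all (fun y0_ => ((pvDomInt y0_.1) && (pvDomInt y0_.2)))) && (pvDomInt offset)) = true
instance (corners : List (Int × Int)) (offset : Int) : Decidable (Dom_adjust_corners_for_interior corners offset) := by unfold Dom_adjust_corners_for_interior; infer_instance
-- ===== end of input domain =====

-- B replaces A's four-way index branch by a recursion over corners[:4] carrying a delta
-- vector rotated 90° each step (alternative decomposition; same values).

-- ===== PORT A =====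
-- A's loop body: enumerate the corners; on index 0..3 append the shifted corner, otherwise nothing.
def pvAStep (offset : Int) (acc : List (Int × Int)) (p : Int × (Int × Int)) : List (Int × Int) :=
  if p.1 = 0 then acc ++ [(p.2.1 + offset, p.2.2 + offset)]
  else if p.1 = 1 then acc ++ [(p.2.1 - offset, p.2.2 + offset)]
  else if p.1 = 2 then acc ++ [(p.2.1 - offset, p.2.2 - offset)]
  else if p.1 = 3 then acc ++ [(p.2.1 + offset, p.2.2 - offset)]
  else acc

def adjust_corners_for_interior (corners : List (Int × Int)) (offset : Int) : List (Int × Int) :=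
  (PySem.List.enumerate corners).foldl (pvAStep offset) []

-- ===== PORT B =====
-- B's inner 'go': shift the head by (dx, dy), recurse on the tail with the delta rotated.
def pvGo (pts : List (Int × Int)) (dx dy : Int) : List (Int × Int) :=
  match pts with
  | [] => []
  | (x, y) :: rest => (x + dx, y + dy) :: pvGo rest (-dy) dx

def adjust_corners_for_interior_alt (corners : List (Int × Int)) (offset : Int) : List (Int × Int) :=
  pvGo (PySem.List.slice corners none (some 4)) offset offset

-- ===== PRECONDITION & SPEC =====
def Spec_adjust_corners_for_interior (corners : List (Int × Int)) (offset : Int) (out : List (Int × Int)) : Prop := out = adjust_corners_for_interior_alt corners offset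
instance (corners : List (Int × Int)) (offset : Int) (out : List (Int × Int)) : Decidable (Spec_adjust_corners_for_interior corners offset out) := by unfold Spec_adjust_corners_for_interior; infer_instance

-- ===== CLAIM (what is proved, stated in full; the proofs are below) =====
def Claim_equal_adjust_corners_for_interior : Prop := ∀ (corners : List (Int × Int)) (offset : Int), Dom_adjust_corners_for_interior corners offset → Spec_adjust_corners_for_interior corners offset (adjust_corners_for_interior corners offset)

-- ===== LEMMAS AND PROOFS =====

-- Past index 3, A's loop body never appends: the fold is the identity on the accumulator.
theorem foldl_pvAStep_ge_four (offset : Int) (xs : List (Int × Int)) :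
    ∀ (s : Int) (acc : List (Int × Int)), 4 ≤ s →
      (PySem.List.enumerate xs s).foldl (pvAStep offset) acc = acc := by
  induction xs with
  | nil => intro s acc _; simp [PySem.List.enumerate_nil]
  | cons x t ih =>
      intro s acc hs
      rw [PySem.List.enumerate_cons, List.foldl_cons]
      have h0 : pvAStep offset acc (s, x) = acc := by
        simp only [pvAStep]
        have : ¬ s = 0 ∧ ¬ s = 1 ∧ ¬ s = 2 ∧ ¬ s = 3 := by omega
        simp [this.1, this.2.1, this.2.2.1, this.2.2.2]
      rw [h0]; exact ih (s + 1) acc (by omega)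

-- corners[:4] is take 4.
theorem slice_four (xs : List (Int × Int)) :
    PySem.List.slice xs none (some 4) = xs.take 4 := by
  have := PySem.List.slice_to_natCast xs 4
  simpa using this

-- ===== VERDICT (by name: the statement is the Claim_ definition above) =====
theorem adjust_corners_for_interior_spec : Claim_equal_adjust_corners_for_interior := by
  intro corners offset _
  show adjust_corners_for_interior corners offset = adjust_corners_for_interior_alt corners offset
  match corners with
  | [] => rfl
  | [a] => simp [adjust_corners_for_interior, adjust_corners_for_interior_alt, slice_four,
      PySem.List.enumerate_cons, PySem.List.enumerate_nil, pvAStep, pvGo]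
  | [a, b] => simp [adjust_corners_for_interior, adjust_corners_for_interior_alt, slice_four,
      PySem.List.enumerate_cons, PySem.List.enumerate_nil, pvAStep, pvGo, ← sub_eq_add_neg]
  | [a, b, c] => simp [adjust_corners_for_interior, adjust_corners_for_interior_alt, slice_four,
      PySem.List.enumerate_cons, PySem.List.enumerate_nil, pvAStep, pvGo, ← sub_eq_add_neg]
  | a :: b :: c :: d :: rest =>
      simp only [adjust_corners_for_interior, adjust_corners_for_interior_alt, slice_four]
      simp [PySem.List.enumerate_cons, pvAStep, pvGo, ← sub_eq_add_neg]
      exact foldl_pvAStep_ge_four offset rest 4 _ (by norm_num)
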